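-- pv_equiv track=rewrite | github.com/inesnoussa99/graph-recipe | codes_sources.py | liste_to_dic
-- ===== SOURCE A (Python) =====
-- def recup_fav (ch) :
--     '''Fonction permettant de récupérer le verbe de la relation entre 2 espèces pour une ligne de la liste
--     Args:
--         ch(str), chaine de caractères de type 'espèce1;favorise;espèce2')
--     Return:
--         (str), chaine de caractères parmi: 'favorise', 'défavorise', 'attire', 'repousse'
--     '''
--     p=ch.find(";")
--     ch1=ch[p+1:]
--     q=ch1.find(";")
--     return ch[p+1:q+p+1]
--
-- def recup_gauche (ch) :
--     '''Fonction permettant de récupérer l'espèce à gauche dans la ligne de la liste pour une relation entre 2 espèces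
--     Args:
--         ch(str), chaine de caractères de type 'espèce1;favorise;espèce2')
--     Return:
--         (str), chaine de caractères 'espèce1'
--     '''
--     p=ch.find(";")
--     return ch[:p]
--
-- def recup_droite (ch):
--     '''Fonction permettant de récupérer l'espèce à droite dans la ligne de la liste pour une relation entre 2 espèces
--     Args:
--         ch(str), chaine de caractères de type 'espèce1;favorise;espèce2')
--     Return:
--         (str), chaine de caractères 'espèce2'
--     '''
--     p=ch.find(";")
--     ch1=ch[p+1:]
--     q=ch1.find(";")
--     return ch[q+p+2:]
--
-- def liste_to_dic (listeCSV) :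
--     '''Fonction qui permet de tranformer une liste en dictionnaire
--     Args:
--         listeCSV(list), liste avec les relations entre espèces issue de fichier CSV
--     Return:
--         dico(dict), dictionnaire ayant pour clés les espèces et pour valeurs les espèces qu'ils favorisent
--     '''
--     dico={}
--     for i in range (len(listeCSV)) :
--         ligne=listeCSV[i][0]
--         gauche=recup_gauche(ligne)
--         droite=recup_droite(ligne)
--         fav=recup_fav(ligne)
--         if fav =='favorise':
--             dico[gauche]=dico.get(gauche ,[])
--             dico[gauche].append(droite)
--     return dico
-- ===== SOURCE B (Python) =====
-- def liste_to_dic(listeCSV):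
--     '''Two-stage rebuild: first collect the list of (left, right) favor edges
--     with str.partition, then group the edges by left species (keys in first
--     occurrence order) with a membership pass and a filtering comprehension.'''
--     edges = []
--     for row in listeCSV:
--         gauche, sep1, reste = row[0].partition(';')
--         verbe, sep2, droite = reste.partition(';')
--         if sep2 and verbe == 'favorise':
--             edges.append((gauche, droite))
--     cles = []
--     for g, _ in edges:
--         if g not in cles:
--             cles.append(g)
--     return {g: [d for g2, d in edges if g2 == g] for g in cles}
-- ===== Notes on version B (the rewrite author's own statement) =====
-- stated objective: alternative
-- what changed: Replaces A's single pass that mutates a dict of lists via three find/slice helpers with a two-stage pipeline: a first pass extracts a flat edge list using str.partition, then the dict is assembled afterwards by deduplicating the keys and grouping the edges per key with a filtering comprehension.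
-- intended difference: On lists containing a line with no ';' whose all-but-last-character prefix is exactly 'favorise' (e.g. 'favorise!'), A's find returns -1 and its slice arithmetic accidentally treats the malformed line as a relation, returning a dict with key 'favorise' mapped to the whole line; B skips such malformed lines, which is the intended behaviour for a CSV relation parser. — e.g. on liste_to_dic([["favorise!"]]): A returns [("favorise", ["favorise!"])], B returns []
import Mathlib
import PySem

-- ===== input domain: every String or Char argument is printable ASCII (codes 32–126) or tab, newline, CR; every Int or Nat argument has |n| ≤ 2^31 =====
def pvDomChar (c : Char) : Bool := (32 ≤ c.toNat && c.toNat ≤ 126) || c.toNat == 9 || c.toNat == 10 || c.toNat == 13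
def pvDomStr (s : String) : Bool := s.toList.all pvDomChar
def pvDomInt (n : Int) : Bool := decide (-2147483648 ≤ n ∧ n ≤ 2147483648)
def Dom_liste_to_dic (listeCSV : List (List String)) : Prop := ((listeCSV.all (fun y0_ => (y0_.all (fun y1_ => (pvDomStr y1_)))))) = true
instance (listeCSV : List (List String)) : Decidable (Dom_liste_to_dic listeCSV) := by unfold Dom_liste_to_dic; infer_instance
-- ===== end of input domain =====

set_option maxRecDepth 8000


-- B rebuilds the dict in two stages (collect a flat favor-edge list with str.partition,
-- then group the edges per first-occurrence key) instead of A's single pass that mutates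
-- a dict through three find/slice helpers; on malformed lines with no ';' that read
-- 'favorise'+1 char, A accidentally fires and B intentionally skips (see D_ below).

-- ===== PORT A =====
def recup_fav (ch : String) : String :=
  let p := PySem.Str.find ch ";"
  let ch1 := PySem.Str.slice ch (some (p + 1)) none
  let q := PySem.Str.find ch1 ";"
  PySem.Str.slice ch (some (p + 1)) (some (q + p + 1))

def recup_gauche (ch : String) : String :=
  let p := PySem.Str.find ch ";"
  PySem.Str.slice ch none (some p)

def recup_droite (ch : String) : String :=
  let p := PySem.Str.find ch ";"
  let ch1 := PySem.Str.slice ch (some (p + 1)) none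
  let q := PySem.Str.find ch1 ";"
  PySem.Str.slice ch (some (q + p + 2)) none

-- body of one iteration of A's loop, given ligne = listeCSV[i][0]
def pvLineA (dico : PySem.Dict String (List String)) (ligne : String) :
    PySem.Dict String (List String) :=
  let gauche := recup_gauche ligne
  let droite := recup_droite ligne
  let fav := recup_fav ligne
  if fav == "favorise" then
    let dico' := dico.insert gauche (dico.getD gauche [])   -- dico[gauche]=dico.get(gauche,[])
    dico'.modify gauche [] (fun v => v ++ [droite])          -- dico[gauche].append(droite)
  else dico

def pvStepA (dico : PySem.Dict String (List String)) (row : List String) :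
    PySem.Dict String (List String) :=
  match PySem.List.pyGet? row 0 with
  | none => dico          -- Python raises IndexError on an empty row; Pre_ excludes it
  | some ligne => pvLineA dico ligne

def liste_to_dic (listeCSV : List (List String)) : List (String × List String) :=
  ((PySem.List.pyRange 0 (PySem.List.len listeCSV) 1).foldl
      (fun dico i => pvStepA dico (PySem.List.pyGetD listeCSV i []))
      PySem.Dict.empty).items

-- ===== PORT B =====
-- hand port of s.partition(';') (PySem has no partition): exact — the first ';' (if any)
-- splits s into (before, ';', after); with no ';' the result is (s, '', '')
def pyPartitionSemi (s : String) : String × String × String :=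
  let p := PySem.Str.find s ";"
  if p = -1 then (s, "", "")
  else (PySem.Str.slice s none (some p), ";",
        PySem.Str.slice s (some (p + 1)) none)

-- stage-1 loop body of Source B: unpack with partition twice, append the favor edge
def pvStepBedges (es : List (String × String)) (row : List String) :
    List (String × String) :=
  match PySem.List.pyGet? row 0 with
  | none => es            -- Python raises IndexError on an empty row; Pre_ excludes it
  | some ligne =>
    let p1 := pyPartitionSemi ligne
    let p2 := pyPartitionSemi p1.2.2
    if p2.2.1 ≠ "" ∧ p2.1 = "favorise" then es ++ [(p1.1, p2.2.2)] else es

-- stage 2 of Source B: dedup the left species in order, then one filtering pass per key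
def pvGroupB (edges : List (String × String)) : List (String × List String) :=
  let cles := edges.foldl (fun ks e => PySem.Set.add ks e.1) []
  cles.map (fun g => (g, (edges.filter (fun e => e.1 == g)).map Prod.snd))

def liste_to_dic_alt (listeCSV : List (List String)) : List (String × List String) :=
  pvGroupB (listeCSV.foldl pvStepBedges [])

-- ===== PRECONDITION & SPEC =====
-- Pre_ excludes lists containing an empty row: there A's listeCSV[i][0] raises IndexError.
def Pre_liste_to_dic (listeCSV : List (List String)) : Prop :=
  ∀ row ∈ listeCSV, row ≠ []
instance (listeCSV : List (List String)) : Decidable (Pre_liste_to_dic listeCSV) := by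
  unfold Pre_liste_to_dic; infer_instance

def pvWitness_liste_to_dic : List (List String) :=
  [["a;favorise;b"], ["x;attire;y"], ["a;favorise;c"]]

-- a malformed line: no ';' at all, and dropping its last character leaves exactly 'favorise'
def pvBadLine (s : String) : Bool :=
  decide (';' ∉ s.toList) && (s.toList.dropLast == "favorise".toList)

-- On lists containing a line with no ';' whose all-but-last-character prefix is exactly
-- 'favorise' (e.g. 'favorise!'), A's find returns -1 and its slice arithmetic accidentally
-- treats the malformed line as a relation (key 'favorise', value the whole line); B skips
-- such malformed lines, which is the intended behaviour for a CSV relation parser.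
def D_liste_to_dic (listeCSV : List (List String)) : Prop :=
  (listeCSV.any fun row => pvBadLine (row.headD "")) = true
instance (listeCSV : List (List String)) : Decidable (D_liste_to_dic listeCSV) := by
  unfold D_liste_to_dic; infer_instance

def Spec_liste_to_dic (listeCSV : List (List String)) (out : List (String × List String)) : Prop :=
  ¬ D_liste_to_dic listeCSV → out = liste_to_dic_alt listeCSV
instance (listeCSV : List (List String)) (out : List (String × List String)) :
    Decidable (Spec_liste_to_dic listeCSV out) := by unfold Spec_liste_to_dic; infer_instance

def pvDiffWitness_liste_to_dic : List (List String) := [["favorise!"]]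
def pvDiffWitnessOut_liste_to_dic :
    (List (String × List String)) × (List (String × List String)) :=
  ([("favorise", ["favorise!"])], [])

-- ===== CLAIM (what is proved, stated in full; the proofs are below) =====
def Claim_unchanged_liste_to_dic : Prop :=
  ∀ (listeCSV : List (List String)), Dom_liste_to_dic listeCSV →
    Pre_liste_to_dic listeCSV → Spec_liste_to_dic listeCSV (liste_to_dic listeCSV)

def Claim_changed_liste_to_dic : Prop :=
  Dom_liste_to_dic (pvDiffWitness_liste_to_dic) ∧
  Pre_liste_to_dic (pvDiffWitness_liste_to_dic) ∧
  D_liste_to_dic (pvDiffWitness_liste_to_dic) ∧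
  liste_to_dic (pvDiffWitness_liste_to_dic) = pvDiffWitnessOut_liste_to_dic.1 ∧
  liste_to_dic_alt (pvDiffWitness_liste_to_dic) = pvDiffWitnessOut_liste_to_dic.2 ∧
  pvDiffWitnessOut_liste_to_dic.1 ≠ pvDiffWitnessOut_liste_to_dic.2

def Claim_exact_liste_to_dic : Prop :=
  ∀ (listeCSV : List (List String)), Dom_liste_to_dic listeCSV →
    Pre_liste_to_dic listeCSV → D_liste_to_dic listeCSV →
    liste_to_dic listeCSV ≠ liste_to_dic_alt listeCSV

-- ===== LEMMAS AND PROOFS =====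

-- every list of characters is either ';'-free or splits at its first ';'
lemma pvFirstSep (l : List Char) :
    (';' ∉ l) ∨ ∃ a t, l = a ++ ';' :: t ∧ ';' ∉ a := by
  induction l with
  | nil => exact Or.inl (by simp)
  | cons c rest ih =>
    by_cases hc : c = ';'
    · exact Or.inr ⟨[], rest, by simp [hc], by simp⟩
    · rcases ih with h | ⟨a, t, ht, ha⟩
      · refine Or.inl ?_
        intro hm
        rcases List.mem_cons.mp hm with h1 | h1
        · exact hc h1.symm
        · exact h h1
      · refine Or.inr ⟨c :: a, t, by simp [ht], ?_⟩
        intro hm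
        rcases List.mem_cons.mp hm with h1 | h1
        · exact hc h1.symm
        · exact ha h1

-- ---- ch.find(';') ----
lemma pvFindGoNone (l : List Char) (k : Nat) (h : ';' ∉ l) :
    PySem.Chars.find.go [';'] l k = -1 := by
  induction l generalizing k with
  | nil => simp [PySem.Chars.find.go]
  | cons c rest ih =>
    have hc : c ≠ ';' := fun hc => h (by simp [hc])
    simp only [PySem.Chars.find.go, List.isPrefixOf]
    simp only [List.isPrefixOf] at *
    rw [if_neg (by simp [Ne.symm hc])]
    exact ih (k + 1) (fun hm => h (by simp [hm]))

lemma pvFindGoSome (a t : List Char) (k : Nat) (h : ';' ∉ a) :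
    PySem.Chars.find.go [';'] (a ++ ';' :: t) k = (k : Int) + a.length := by
  induction a generalizing k with
  | nil => simp [PySem.Chars.find.go, List.isPrefixOf]
  | cons c a' ih =>
    have hc : c ≠ ';' := fun hc => h (by simp [hc])
    simp only [List.cons_append, PySem.Chars.find.go, List.isPrefixOf]
    rw [if_neg (by simp [Ne.symm hc])]
    rw [ih (k + 1) (fun hm => h (by simp [hm]))]
    simp only [List.length_cons]
    push_cast; ring

lemma pvFindNone (l : List Char) (h : ';' ∉ l) : PySem.Chars.find l [';'] = -1 := by
  simpa [PySem.Chars.find] using pvFindGoNone l 0 h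

lemma pvFindSome (a t : List Char) (h : ';' ∉ a) :
    PySem.Chars.find (a ++ ';' :: t) [';'] = (a.length : Int) := by
  simpa [PySem.Chars.find] using pvFindGoSome a t 0 h

-- ---- the recup_ helpers, characterised through the first-';' decomposition ----
lemma pvOfListEq {s : String} {l : List Char} (h : s.toList = l) : s = String.ofList l := by
  rw [← h, String.ofList_toList]

lemma pvSemiToList : (";" : String).toList = [';'] := rfl

lemma pvRecupGauche (s : String) (a t : List Char) (hs : s.toList = a ++ ';' :: t)
    (ha : ';' ∉ a) : recup_gauche s = String.ofList a := by
  apply pvOfListEq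
  simp only [recup_gauche, PySem.Str.toList_slice, PySem.Str.find_eq, pvSemiToList, hs,
    PySem.Chars.slice_eq_listSlice, pvFindSome a t ha]
  rw [PySem.List.slice_to_natCast]
  simpa using List.take_left a (';' :: t)

lemma pvRecupFavNone (s : String) (h : ';' ∉ s.toList) :
    recup_fav s = String.ofList s.toList.dropLast := by
  apply pvOfListEq
  simp only [recup_fav, PySem.Str.toList_slice, PySem.Str.find_eq, pvSemiToList,
    PySem.Chars.slice_eq_listSlice]
  rw [pvFindNone s.toList h]
  have h0 : PySem.List.slice s.toList (some (-1 + 1)) none = s.toList := by norm_num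
  rw [h0, pvFindNone s.toList h]
  norm_num [PySem.List.slice_to_neg_one]

lemma pvChSliceDrop (a t : List Char) (ha : ';' ∉ a) :
    PySem.List.slice (a ++ ';' :: t) (some ((a.length : Int) + 1)) none = t := by
  have h1 : (a.length : Int) + 1 = ((a.length + 1 : Nat) : Int) := by push_cast; ring
  rw [h1, PySem.List.slice_from_natCast]
  have h2 : a ++ ';' :: t = (a ++ [';']) ++ t := by simp
  rw [h2]
  simpa using List.drop_left (a ++ [';']) t

lemma pvRecupFavOne (s : String) (a t : List Char) (hs : s.toList = a ++ ';' :: t)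
    (ha : ';' ∉ a) (ht : ';' ∉ t) : recup_fav s = "" := by
  have : recup_fav s = String.ofList [] := by
    apply pvOfListEq
    simp only [recup_fav, PySem.Str.toList_slice, PySem.Str.find_eq, pvSemiToList,
      PySem.Chars.slice_eq_listSlice, hs]
    rw [pvFindSome a t ha, pvChSliceDrop a t ha, pvFindNone t ht]
    have h2 : (-1 : Int) + (a.length : Int) + 1 = ((a.length : Nat) : Int) := by push_cast; ring
    have h1 : (a.length : Int) + 1 = ((a.length + 1 : Nat) : Int) := by push_cast; ring
    rw [h2, h1, PySem.List.slice_natCast]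
    simp
  simpa using this

lemma pvRecupFavTwo (s : String) (a b u : List Char) (hs : s.toList = a ++ ';' :: (b ++ ';' :: u))
    (ha : ';' ∉ a) (hb : ';' ∉ b) : recup_fav s = String.ofList b := by
  apply pvOfListEq
  simp only [recup_fav, PySem.Str.toList_slice, PySem.Str.find_eq, pvSemiToList,
    PySem.Chars.slice_eq_listSlice, hs]
  rw [pvFindSome a _ ha, pvChSliceDrop a _ ha, pvFindSome b u hb]
  have h2 : (b.length : Int) + (a.length : Int) + 1 = ((b.length + a.length + 1 : Nat) : Int) := by
    push_cast; ring
  have h1 : (a.length : Int) + 1 = ((a.length + 1 : Nat) : Int) := by push_cast; ring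
  rw [h2, h1, PySem.List.slice_natCast]
  have hd : List.drop (a.length + 1) (a ++ ';' :: (b ++ ';' :: u)) = b ++ ';' :: u := by
    have h3 : a ++ ';' :: (b ++ ';' :: u) = (a ++ [';']) ++ (b ++ ';' :: u) := by simp
    rw [h3]; simpa using List.drop_left (a ++ [';']) (b ++ ';' :: u)
  rw [hd]
  have h4 : b.length + a.length + 1 - (a.length + 1) = b.length := by omega
  rw [h4]
  simpa using List.take_left b (';' :: u)

lemma pvRecupDroiteTwo (s : String) (a b u : List Char)
    (hs : s.toList = a ++ ';' :: (b ++ ';' :: u)) (ha : ';' ∉ a) (hb : ';' ∉ b) :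
    recup_droite s = String.ofList u := by
  apply pvOfListEq
  simp only [recup_droite, PySem.Str.toList_slice, PySem.Str.find_eq, pvSemiToList,
    PySem.Chars.slice_eq_listSlice, hs]
  rw [pvFindSome a _ ha, pvChSliceDrop a _ ha, pvFindSome b u hb]
  have h1 : (b.length : Int) + (a.length : Int) + 2 = ((a.length + b.length + 2 : Nat) : Int) := by
    push_cast; ring
  rw [h1, PySem.List.slice_from_natCast]
  have h2 : a ++ ';' :: (b ++ ';' :: u) = ((a ++ [';']) ++ (b ++ [';'])) ++ u := by simp
  rw [h2]
  have hlen : a.length + b.length + 2 = ((a ++ [';']) ++ (b ++ [';'])).length := by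
    simp; omega
  rw [hlen]
  exact List.drop_left

-- ---- s.partition(';'), characterised through the first-';' decomposition ----
lemma pvPartNone (s : String) (h : ';' ∉ s.toList) : pyPartitionSemi s = (s, "", "") := by
  simp only [pyPartitionSemi, PySem.Str.find_eq, pvSemiToList]
  rw [pvFindNone s.toList h]
  simp

lemma pvPartSome (s : String) (a t : List Char) (hs : s.toList = a ++ ';' :: t)
    (ha : ';' ∉ a) : pyPartitionSemi s = (String.ofList a, ";", String.ofList t) := by
  have hf : PySem.Chars.find s.toList [';'] = (a.length : Int) := by
    rw [hs]; exact pvFindSome a t ha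
  have hne : ((a.length : Int)) ≠ -1 := by omega
  have h1 : PySem.Str.slice s none (some ((a.length : Int))) = String.ofList a := by
    apply pvOfListEq
    simp only [PySem.Str.toList_slice, PySem.Chars.slice_eq_listSlice, hs]
    rw [PySem.List.slice_to_natCast]
    simpa using List.take_left a (';' :: t)
  have h2 : PySem.Str.slice s (some ((a.length : Int) + 1)) none = String.ofList t := by
    apply pvOfListEq
    simp only [PySem.Str.toList_slice, PySem.Chars.slice_eq_listSlice, hs]
    exact pvChSliceDrop a t ha
  simp only [pyPartitionSemi, PySem.Str.find_eq, pvSemiToList, hf]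
  rw [if_neg hne, h1, h2]

-- ---- the per-line edge each side extracts ----
def pvEdgeA (s : String) : Option (String × String) :=
  if recup_fav s == "favorise" then some (recup_gauche s, recup_droite s) else none

def pvEdgeB (s : String) : Option (String × String) :=
  let p1 := pyPartitionSemi s
  let p2 := pyPartitionSemi p1.2.2
  if p2.2.1 ≠ "" ∧ p2.1 = "favorise" then some (p1.1, p2.2.2) else none

lemma pvEmptyNoSemi : (';' ∉ ("" : String).toList) := by decide

lemma pvOfListToList (l : List Char) : (String.ofList l).toList = l := by simp

lemma pvEdgeAB (s : String) (hb : pvBadLine s = false) : pvEdgeA s = pvEdgeB s := by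
  rcases pvFirstSep s.toList with h | ⟨a, t, hst, ha⟩
  · -- no ';' in the line: A's fav is s[:-1], ≠ 'favorise' outside D_; B's sep2 is ''
    have hdrop : s.toList.dropLast ≠ "favorise".toList := by
      simp only [pvBadLine, Bool.and_eq_false_iff] at hb
      rcases hb with hb | hb
      · exact absurd h (by simpa using hb)
      · simpa using hb
    have hfav : (recup_fav s == "favorise") = false := by
      rw [pvRecupFavNone s h, beq_eq_false_iff_ne]
      intro heq
      exact hdrop (by simpa [String.toList_ofList] using congrArg String.toList heq)
    simp only [pvEdgeA, pvEdgeB, hfav, pvPartNone s h]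
    rw [pvPartNone "" pvEmptyNoSemi]
    simp
  · rcases pvFirstSep t with ht | ⟨b, u, htu, hb2⟩
    · -- exactly one ';': A's fav is the empty slice; B's second partition has sep2 = ''
      have hfav : (recup_fav s == "favorise") = false := by
        rw [pvRecupFavOne s a t hst ha ht]; decide
      simp only [pvEdgeA, pvEdgeB, hfav, pvPartSome s a t hst ha]
      rw [pvPartNone (String.ofList t) (by rw [pvOfListToList]; exact ht)]
      simp
    · -- at least two ';': both sides extract (a, b, u)
      subst htu
      simp only [pvEdgeA, pvEdgeB, pvRecupFavTwo s a b u hst ha hb2,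
        pvRecupGauche s a _ hst ha, pvRecupDroiteTwo s a b u hst ha hb2,
        pvPartSome s a _ hst ha]
      rw [pvPartSome (String.ofList (b ++ ';' :: u)) b u (by rw [pvOfListToList]) hb2]
      by_cases hcond : String.ofList b = "favorise"
      · simp [hcond]
      · simp [hcond]

lemma pvEdgeBA (s : String) (h : (pvEdgeB s).isSome = true) : (pvEdgeA s).isSome = true := by
  rcases pvFirstSep s.toList with h1 | ⟨a, t, hst, ha⟩
  · exfalso
    simp only [pvEdgeB, pvPartNone s h1] at h
    rw [pvPartNone "" pvEmptyNoSemi] at h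
    simp at h
  · rcases pvFirstSep t with ht | ⟨b, u, htu, hb2⟩
    · exfalso
      simp only [pvEdgeB, pvPartSome s a t hst ha] at h
      rw [pvPartNone (String.ofList t) (by rw [pvOfListToList]; exact ht)] at h
      simp at h
    · subst htu
      simp only [pvEdgeB, pvPartSome s a _ hst ha] at h
      rw [pvPartSome (String.ofList (b ++ ';' :: u)) b u (by rw [pvOfListToList]) hb2] at h
      simp only [pvEdgeA, pvRecupFavTwo s a b u hst ha hb2]
      by_cases hcond : String.ofList b = "favorise"
      · simp [hcond]
      · simp [hcond] at h

lemma pvBadEdge (s : String) (hb : pvBadLine s = true) :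
    (pvEdgeA s).isSome = true ∧ (pvEdgeB s).isSome = false := by
  simp only [pvBadLine, Bool.and_eq_true, decide_eq_true_eq, beq_iff_eq] at hb
  constructor
  · have hfav : recup_fav s = "favorise" := by
      rw [pvRecupFavNone s hb.1, hb.2, String.ofList_toList]
    simp [pvEdgeA, hfav]
  · simp only [pvEdgeB, pvPartNone s hb.1]
    rw [pvPartNone "" pvEmptyNoSemi]
    simp

-- ---- both folds, re-expressed through the per-row edge list ----
def pvModStep (d : PySem.Dict String (List String)) (p : String × String) :
    PySem.Dict String (List String) :=
  d.modify p.1 [] (fun v => v ++ [p.2])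

def pvEdges (X : String → Option (String × String)) (rows : List (List String)) :
    List (String × String) :=
  rows.filterMap (fun row => (PySem.List.pyGet? row 0).bind X)

lemma pvModifyEqInsert (d : PySem.Dict String (List String)) (k : String) (d0 : List String)
    (f : List String → List String) : d.modify k d0 f = d.insert k (f (d.getD k d0)) := rfl

lemma pvLineA_mod (d : PySem.Dict String (List String)) (s : String) :
    pvLineA d s = match pvEdgeA s with
                  | some e => pvModStep d e
                  | none => d := by
  simp only [pvLineA, pvEdgeA, pvModStep]
  by_cases h : (recup_fav s == "favorise") = true
  · simp only [h, if_true]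
    rw [pvModifyEqInsert, pvModifyEqInsert, PySem.Dict.getD_insert_self,
      PySem.Dict.insert_insert_self]
  · simp only [h]
    simp only [Bool.not_eq_true] at h
    simp [h]

lemma pvFoldA (rows : List (List String)) :
    ∀ d : PySem.Dict String (List String),
      rows.foldl pvStepA d = (pvEdges pvEdgeA rows).foldl pvModStep d := by
  induction rows with
  | nil => intro d; rfl
  | cons row rest ih =>
    intro d
    simp only [List.foldl_cons, pvEdges, List.filterMap_cons]
    cases hg : PySem.List.pyGet? row 0 with
    | none =>
      have hstep : pvStepA d row = d := by simp [pvStepA, hg]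
      simpa [hstep, hg] using ih d
    | some ligne =>
      have hstep : pvStepA d row = pvLineA d ligne := by simp [pvStepA, hg]
      rw [hstep, pvLineA_mod]
      cases he : pvEdgeA ligne with
      | none => simpa [hg, he] using ih d
      | some e =>
        simpa [hg, he] using ih (pvModStep d e)

lemma pvFoldB (rows : List (List String)) :
    ∀ es0 : List (String × String),
      rows.foldl pvStepBedges es0 = es0 ++ pvEdges pvEdgeB rows := by
  induction rows with
  | nil => intro es0; simp [pvEdges]
  | cons row rest ih =>
    intro es0
    simp only [List.foldl_cons, pvEdges, List.filterMap_cons]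
    cases hg : PySem.List.pyGet? row 0 with
    | none =>
      have hstep : pvStepBedges es0 row = es0 := by simp [pvStepBedges, hg]
      simpa [hstep, hg] using ih es0
    | some ligne =>
      have hstep : pvStepBedges es0 row =
          match pvEdgeB ligne with
          | some e => es0 ++ [e]
          | none => es0 := by
        simp only [pvStepBedges, hg, pvEdgeB]
        split_ifs with hc
        · simp [hc]
        · simp [hc]
      rw [hstep]
      cases he : pvEdgeB ligne with
      | none => simpa [hg, he] using ih es0
      | some e =>
        rw [ih (es0 ++ [e])]
        simp [hg, he, pvEdges]

-- ---- the grouped representation shared by both sides ----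
def pvGroup (es : List (String × String)) : List (String × List String) :=
  (PySem.Set.update ([] : List String) (es.map Prod.fst)).map
    (fun g => (g, (es.filter (fun e => e.1 == g)).map Prod.snd))

lemma pvItemsMod (es : List (String × String)) :
    (es.foldl pvModStep PySem.Dict.empty).items = pvGroup es := by
  have hnd : (es.foldl pvModStep PySem.Dict.empty).keys.Nodup := by
    have := PySem.Dict.nodup_keys_foldl_modify_key es Prod.fst []
      (fun _ x => fun v => v ++ [x.2]) PySem.Dict.empty (by simp)
    simpa [pvModStep] using this
  have hkeys : (es.foldl pvModStep PySem.Dict.empty).keys =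
      PySem.Set.update ([] : List String) (es.map Prod.fst) := by
    have := PySem.Dict.keys_foldl_modify_key es Prod.fst []
      (fun _ x => fun v => v ++ [x.2]) PySem.Dict.empty
    simpa [pvModStep] using this
  rw [PySem.Dict.items_eq_map_keys _ hnd [], hkeys, pvGroup]
  apply List.map_congr_left
  intro g _
  have hg := PySem.Dict.getD_foldl_modify_append es PySem.Dict.empty g
  simp only [PySem.Dict.getD_empty, List.nil_append] at hg
  have hfold : es.foldl (fun d p => d.modify p.1 [] (· ++ [p.2])) PySem.Dict.empty =
      es.foldl pvModStep PySem.Dict.empty := rfl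
  rw [hfold] at hg
  rw [hg]

lemma pvGroupB_eq (es : List (String × String)) : pvGroupB es = pvGroup es := by
  unfold pvGroupB pvGroup
  rw [← PySem.Set.update_map_eq_foldl_add]

-- both outputs, in closed form
lemma pvAClosed (rows : List (List String)) :
    liste_to_dic rows = pvGroup (pvEdges pvEdgeA rows) := by
  unfold liste_to_dic
  rw [PySem.List.foldl_pyRange_zero_pyGetD rows [] pvStepA PySem.Dict.empty]
  rw [pvFoldA rows PySem.Dict.empty, pvItemsMod]

lemma pvBClosed (rows : List (List String)) :
    liste_to_dic_alt rows = pvGroup (pvEdges pvEdgeB rows) := by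
  unfold liste_to_dic_alt
  rw [pvFoldB rows [], List.nil_append, pvGroupB_eq]

-- ---- counting, for tightness ----
def pvSz (items : List (String × List String)) : Nat :=
  (items.map (fun p => p.2.length)).sum

lemma pvIndZero (K : List String) (x : String) (hx : x ∉ K) :
    (K.map (fun g => if (x == g) = true then (1 : Nat) else 0)).sum = 0 := by
  induction K with
  | nil => simp
  | cons g K' ih =>
    have hxg : x ≠ g := fun h => hx (by simp [h])
    simp only [List.map_cons, List.sum_cons]
    rw [if_neg (by simp [hxg]), ih (fun h => hx (by simp [h]))]

lemma pvIndOne (K : List String) (x : String) (hnd : K.Nodup) (hx : x ∈ K) :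
    (K.map (fun g => if (x == g) = true then (1 : Nat) else 0)).sum = 1 := by
  induction K with
  | nil => simp at hx
  | cons g K' ih =>
    simp only [List.nodup_cons] at hnd
    simp only [List.map_cons, List.sum_cons]
    by_cases hxg : x = g
    · rw [if_pos (by simp [hxg]), pvIndZero K' x (hxg ▸ hnd.1)]
    · rw [if_neg (by simp [hxg])]
      rcases List.mem_cons.mp hx with h | h
      · exact absurd h hxg
      · rw [ih hnd.2 h]

lemma pvSumMapAdd {A : Type} (K : List A) (f g : A → Nat) :
    (K.map (fun x => f x + g x)).sum = (K.map f).sum + (K.map g).sum := by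
  induction K with
  | nil => simp
  | cons x K' ih =>
    simp only [List.map_cons, List.sum_cons, ih]
    omega

lemma pvSumFilter (K : List String) (hnd : K.Nodup) (es : List (String × String))
    (h : ∀ e ∈ es, e.1 ∈ K) :
    (K.map (fun g => (es.filter (fun e => e.1 == g)).length)).sum = es.length := by
  induction es with
  | nil => simp
  | cons e es' ih =>
    have hstep : ∀ g : String,
        ((e :: es').filter (fun e' => e'.1 == g)).length =
          (if (e.1 == g) = true then 1 else 0) + (es'.filter (fun e' => e'.1 == g)).length := by
      intro g
      simp only [List.filter_cons]
      split_ifs with hc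
      · simp only [List.length_cons]; omega
      · simp
    have hmap : K.map (fun g => ((e :: es').filter (fun e' => e'.1 == g)).length) =
        K.map (fun g => (if (e.1 == g) = true then 1 else 0) +
          (es'.filter (fun e' => e'.1 == g)).length) :=
      List.map_congr_left (fun g _ => hstep g)
    rw [hmap]
    rw [pvSumMapAdd K (fun g => if (e.1 == g) = true then (1 : Nat) else 0)
        (fun g => (es'.filter (fun e' => e'.1 == g)).length),
      pvIndOne K e.1 hnd (h e (by simp)),
      ih (fun e' he' => h e' (by simp [he']))]
    simp only [List.length_cons]
    omega

lemma pvSzGroup (es : List (String × String)) : pvSz (pvGroup es) = es.length := by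
  unfold pvSz pvGroup
  rw [List.map_map]
  have hnd : (PySem.Set.update ([] : List String) (es.map Prod.fst)).Nodup :=
    by apply PySem.Set.nodup_update; simp
  have hmem : ∀ e ∈ es, e.1 ∈ PySem.Set.update ([] : List String) (es.map Prod.fst) := by
    intro e he
    rw [PySem.Set.mem_update]
    exact Or.inr (List.mem_map_of_mem he)
  have hcomp : ((fun p : String × List String => p.2.length) ∘
      fun g => (g, (es.filter (fun e => e.1 == g)).map Prod.snd)) =
      fun g => (es.filter (fun e => e.1 == g)).length := by
    funext g; simp
  rw [hcomp]
  exact pvSumFilter _ hnd es hmem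

lemma pvLenFilterMap {α β : Type} (l : List α) (f : α → Option β) :
    (l.filterMap f).length = l.countP (fun x => (f x).isSome) := by
  induction l with
  | nil => simp
  | cons x l' ih =>
    simp only [List.filterMap_cons, List.countP_cons]
    cases hf : f x with
    | none => simp [hf, ih]
    | some y => simp [hf, ih]

lemma pvGetCons {A : Type} (x : A) (xs : List A) :
    PySem.List.pyGet? (x :: xs) 0 = some x := by
  simp [PySem.List.pyGet?, PySem.List.pyIdx?]

lemma pvCountPLt {α : Type} (l : List α) (p q : α → Bool)
    (hpq : ∀ x ∈ l, q x = true → p x = true)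
    (hex : ∃ x ∈ l, p x = true ∧ q x = false) :
    l.countP q < l.countP p := by
  induction l with
  | nil => simp at hex
  | cons y l' ih =>
    simp only [List.countP_cons]
    obtain ⟨x, hx, hpx, hqx⟩ := hex
    rcases List.mem_cons.mp hx with h1 | h1
    · subst h1
      have hmono : l'.countP q ≤ l'.countP p :=
        List.countP_mono_left (fun a ha => hpq a (by simp [ha]))
      simp [hpx, hqx]
      omega
    · have hlt := ih (fun a ha => hpq a (by simp [ha])) ⟨x, h1, hpx, hqx⟩
      have hhead : (if q y = true then 1 else 0) ≤ (if p y = true then 1 else 0) := by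
        cases hq : q y
        · simp
        · simp [hpq y (by simp) hq]
      omega

-- ===== VERDICT (by name: the statement is the Claim_ definition above) =====
theorem liste_to_dic_spec : Claim_unchanged_liste_to_dic := by
  intro listeCSV _hdom _hpre hnd
  rw [pvAClosed, pvBClosed]
  have hedges : pvEdges pvEdgeA listeCSV = pvEdges pvEdgeB listeCSV := by
    unfold pvEdges
    apply List.filterMap_congr
    intro row hrow
    cases row with
    | nil => rfl
    | cons x xs =>
      have hbad : pvBadLine x = false := by
        by_contra hcontra
        exact hnd (by
          unfold D_liste_to_dic
          simp only [List.any_eq_true]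
          exact ⟨x :: xs, hrow, by simpa using hcontra⟩)
      simp [PySem.List.pyGet?, PySem.List.pyIdx?, pvEdgeAB x hbad]
  rw [hedges]

theorem liste_to_dic_changed : Claim_changed_liste_to_dic := by
  unfold Claim_changed_liste_to_dic; decide

theorem liste_to_dic_tight : Claim_exact_liste_to_dic := by
  intro listeCSV _hdom _hpre hd heq
  rw [pvAClosed, pvBClosed] at heq
  have hsz := congrArg pvSz heq
  rw [pvSzGroup, pvSzGroup] at hsz
  unfold pvEdges at hsz
  rw [pvLenFilterMap, pvLenFilterMap] at hsz
  have hbadrow : ∃ row ∈ listeCSV, pvBadLine (row.headD "") = true := by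
    unfold D_liste_to_dic at hd
    simpa [List.any_eq_true] using hd
  obtain ⟨row, hrow, hbad⟩ := hbadrow
  obtain ⟨x, xs, rfl⟩ : ∃ x xs, row = x :: xs := by
    cases hr : row with
    | nil =>
      exfalso
      rw [hr] at hbad
      simp only [List.headD_nil] at hbad
      exact absurd hbad (by decide)
    | cons x xs => exact ⟨x, xs, rfl⟩
  simp only [List.headD_cons] at hbad
  obtain ⟨hfA, hfB⟩ := pvBadEdge x hbad
  have hlt := pvCountPLt listeCSV
    (fun r => ((PySem.List.pyGet? r 0).bind pvEdgeA).isSome)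
    (fun r => ((PySem.List.pyGet? r 0).bind pvEdgeB).isSome)
    (by
      intro r _ hq
      cases r with
      | nil => simp [PySem.List.pyGet?, PySem.List.pyIdx?] at hq
      | cons y ys =>
        simp only [pvGetCons] at hq ⊢
        simp only [Option.bind] at hq ⊢
        exact pvEdgeBA y hq)
    ⟨x :: xs, hrow, by
      constructor
      · simpa [pvGetCons] using hfA
      · simpa [pvGetCons] using hfB⟩
  omega
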